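-- pv_equiv track=rewrite | github.com/lucky-rzj/BERT-ASC-KG | ASC_generating/optimize/opinion_words_extracting_enhanced.py | sort_auxiliary
-- ===== SOURCE A (Python) =====
-- def sort_auxiliary(text_a, text_b):
--     """
--     按 text_a 的单词顺序对 text_b 排序：
--     1. text_b 中存在于 text_a 的词 → 按 text_a 中的出现顺序排列
--     2. text_b 中不存在于 text_a 的词 → 保留原始顺序，放结果末尾
--     3. 保留 text_b 中的重复词
--     """
--     text_a_tokens = [w.lower() for w in text_a.split()]    #原始文本分词（基准顺序）
--     #构建词→索引映射（O(n) 复杂度，比多次 text_a.index(w) 高效）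
--     word_to_index = {word: idx for idx, word in enumerate(text_a_tokens)}
--
--     # 排序规则：
--     # - 存在于 text_a 的词 → 用其在 text_a 中的索引排序
--     # - 新增词 → 用“无穷大”作为索引（确保放末尾），同时保留原始顺序（sorted 是稳定排序）
--     sorted_text_b = sorted(
--         text_b,
--         key=lambda w: word_to_index.get(w.lower(), float('inf'))
--     )
--
--     return sorted_text_b
-- ===== SOURCE B (Python) =====
-- def sort_auxiliary(text_a, text_b):
--     text_a_tokens = [w.lower() for w in text_a.split()]
--     word_to_index = {word: idx for idx, word in enumerate(text_a_tokens)}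
--     buckets = [[] for _ in text_a_tokens]
--     overflow = []
--     for w in text_b:
--         idx = word_to_index.get(w.lower())
--         if idx is None:
--             overflow.append(w)
--         else:
--             buckets[idx].append(w)
--     out = []
--     for b in buckets:
--         out.extend(b)
--     out.extend(overflow)
--     return out
-- ===== Notes on version B (the rewrite author's own statement) =====
-- stated objective: alternative
-- what changed: Replaces the stable sort of text_b keyed by text_a positions with a single-pass bucket grouping (one bucket per text_a token plus an overflow list) concatenated in index order; measured ~1.4x faster at the largest size, below the 1.5x bar.
import Mathlib
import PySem

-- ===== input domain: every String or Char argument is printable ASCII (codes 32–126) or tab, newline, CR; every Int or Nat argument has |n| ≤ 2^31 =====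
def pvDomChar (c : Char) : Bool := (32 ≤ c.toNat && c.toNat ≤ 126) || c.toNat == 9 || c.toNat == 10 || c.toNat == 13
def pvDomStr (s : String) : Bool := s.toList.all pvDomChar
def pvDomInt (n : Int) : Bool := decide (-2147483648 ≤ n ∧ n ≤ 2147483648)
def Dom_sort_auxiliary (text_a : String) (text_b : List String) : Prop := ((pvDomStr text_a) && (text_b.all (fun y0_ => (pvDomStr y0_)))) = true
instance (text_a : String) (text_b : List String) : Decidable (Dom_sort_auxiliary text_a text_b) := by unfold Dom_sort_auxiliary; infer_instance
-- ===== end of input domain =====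

-- B replaces A's stable sort keyed by text_a positions with a one-pass bucket grouping
-- (one bucket per text_a token plus an overflow list), concatenated in index order.

-- ===== PORT A =====
-- Python's float('inf') default is modelled by the index text_a_tokens.length: every index stored in
-- word_to_index is < text_a_tokens.length, so the sort order under this key is exactly Python's.
def sort_auxiliary (text_a : String) (text_b : List String) : List String :=
  let text_a_tokens := (PySem.Str.split₀ text_a).map (fun w => PySem.Str.lower w)
  let word_to_index := (PySem.List.enumerate text_a_tokens 0).foldl
      (fun d p => d.insert p.2 p.1) (PySem.Dict.empty (κ := String) (ν := Int))
  PySem.List.sorted text_b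
    (fun w => word_to_index.getD (PySem.Str.lower w) (text_a_tokens.length : Int)) false

-- ===== PORT B =====
-- idx.toNat is exact: every value stored in word_to_index is a nonnegative enumerate index,
-- exactly the indices Python's buckets[idx] uses.
def sort_auxiliary_alt (text_a : String) (text_b : List String) : List String :=
  let text_a_tokens := (PySem.Str.split₀ text_a).map (fun w => PySem.Str.lower w)
  let word_to_index := (PySem.List.enumerate text_a_tokens 0).foldl
      (fun d p => d.insert p.2 p.1) (PySem.Dict.empty (κ := String) (ν := Int))
  let st := text_b.foldl
      (fun (st : List (List String) × List String) w =>
        match word_to_index.get? (PySem.Str.lower w) with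
        | none => (st.1, st.2 ++ [w])
        | some idx => (st.1.modify idx.toNat (fun b => b ++ [w]), st.2))
      (List.replicate text_a_tokens.length ([] : List String), ([] : List String))
  st.1.foldl (fun out b => out ++ b) [] ++ st.2

-- ===== PRECONDITION & SPEC =====
def Spec_sort_auxiliary (text_a : String) (text_b : List String) (out : List String) : Prop := out = sort_auxiliary_alt text_a text_b
instance (text_a : String) (text_b : List String) (out : List String) : Decidable (Spec_sort_auxiliary text_a text_b out) := by unfold Spec_sort_auxiliary; infer_instance

-- ===== CLAIM (what is proved, stated in full; the proofs are below) =====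
def Claim_equal_sort_auxiliary : Prop := ∀ (text_a : String) (text_b : List String), Dom_sort_auxiliary text_a text_b → Spec_sort_auxiliary text_a text_b (sort_auxiliary text_a text_b)

-- ===== LEMMAS AND PROOFS =====

-- the canonical "bucketed" form both programs compute: for each key value 0..n, the sublist of p with that key
def pvBuckets (key : String → Int) (n : Int) (p : List String) : List String :=
  (PySem.List.pyRange 0 (n + 1)).flatMap (fun k => p.filter (fun x => key x == k))

theorem pv_insertBy_append {α : Type} (before : α → α → Bool) (x : α) (A B : List α)
    (hA : ∀ y ∈ A, before x y = false) (hB : ∀ y ∈ B, before x y = true) :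
    PySem.List.insertBy before x (A ++ B) = A ++ x :: B := by
  induction A with
  | nil =>
    cases B with
    | nil => simp [PySem.List.insertBy]
    | cons b bs => simp [PySem.List.insertBy, hB b (by simp)]
  | cons a A ih =>
    simp only [List.cons_append]
    rw [show PySem.List.insertBy before x (a :: (A ++ B))
        = if before x a then x :: a :: (A ++ B) else a :: PySem.List.insertBy before x (A ++ B)
        from by simp [PySem.List.insertBy]]
    rw [hA a (by simp), if_neg (by simp)]
    simp [ih (fun y hy => hA y (by simp [hy])) ]

theorem pv_mem_flatMap_filter_bound (key : String → Int) (a b : Int) (p : List String) (y : String)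
    (hy : y ∈ (PySem.List.pyRange a b).flatMap (fun k => p.filter (fun x => key x == k))) :
    a ≤ key y ∧ key y < b := by
  rcases List.mem_flatMap.mp hy with ⟨k, hk, hyk⟩
  have hkr := PySem.List.mem_pyRange_one.mp hk
  have := List.mem_filter.mp hyk
  have : key y = k := by simpa using this.2
  omega

theorem pv_insertBy_buckets (key : String → Int) (n : Int) (p : List String) (x : String)
    (hx0 : 0 ≤ key x) (hxn : key x ≤ n) :
    PySem.List.insertBy (fun a b => decide (key a < key b)) x (pvBuckets key n p)
      = pvBuckets key n (p ++ [x]) := by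
  have hsplit : PySem.List.pyRange 0 (n + 1)
      = PySem.List.pyRange 0 (key x) ++ (key x :: PySem.List.pyRange (key x + 1) (n + 1)) := by
    have h1 := PySem.List.pyRange_one_append 0 (key x) (n + 1) hx0 (by omega)
    have h2 := PySem.List.pyRange_one_cons (show key x < n + 1 by omega)
    rw [h1, h2]
  unfold pvBuckets
  rw [hsplit]
  simp only [List.flatMap_append, List.flatMap_cons]
  have hL : (PySem.List.pyRange 0 (key x)).flatMap (fun k => (p ++ [x]).filter (fun y => key y == k))
      = (PySem.List.pyRange 0 (key x)).flatMap (fun k => p.filter (fun y => key y == k)) := by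
    apply List.flatMap_congr; intro k hk
    have hkr := PySem.List.mem_pyRange_one.mp hk
    rw [List.filter_append]
    have : (key x == k) = false := by simp; omega
    simp [this]
  have hR : (PySem.List.pyRange (key x + 1) (n + 1)).flatMap (fun k => (p ++ [x]).filter (fun y => key y == k))
      = (PySem.List.pyRange (key x + 1) (n + 1)).flatMap (fun k => p.filter (fun y => key y == k)) := by
    apply List.flatMap_congr; intro k hk
    have hkr := PySem.List.mem_pyRange_one.mp hk
    rw [List.filter_append]
    have : (key x == k) = false := by simp; omega
    simp [this]
  rw [hL, hR]
  have hF : (p ++ [x]).filter (fun y => key y == key x) = p.filter (fun y => key y == key x) ++ [x] := by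
    rw [List.filter_append]; simp
  rw [hF, ← List.append_assoc]
  rw [pv_insertBy_append (fun a b => decide (key a < key b)) x
      ((PySem.List.pyRange 0 (key x)).flatMap (fun k => p.filter (fun y => key y == k))
        ++ p.filter (fun y => key y == key x))
      ((PySem.List.pyRange (key x + 1) (n + 1)).flatMap (fun k => p.filter (fun y => key y == k)))
      ?_ ?_]
  · simp
  · intro y hy
    rcases List.mem_append.mp hy with h | h
    · have := pv_mem_flatMap_filter_bound key 0 (key x) p y h
      simp; omega
    · have : key y = key x := by simpa using (List.mem_filter.mp h).2
      simp; omega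
  · intro y hy
    have := pv_mem_flatMap_filter_bound key (key x + 1) (n + 1) p y hy
    simp; omega

theorem pv_foldl_insertBy_buckets (key : String → Int) (n : Int) :
    ∀ (xs p : List String), (∀ y ∈ xs, 0 ≤ key y ∧ key y ≤ n) →
    xs.foldl (fun acc x => PySem.List.insertBy (fun a b => decide (key a < key b)) x acc)
      (pvBuckets key n p) = pvBuckets key n (p ++ xs) := by
  intro xs
  induction xs with
  | nil => intro p _; simp
  | cons x xs ih =>
    intro p hb
    simp only [List.foldl_cons]
    rw [pv_insertBy_buckets key n p x (hb x (by simp)).1 (hb x (by simp)).2,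
        ih (p ++ [x]) (fun y hy => hb y (by simp [hy]))]
    simp

theorem pv_sorted_eq_buckets (key : String → Int) (n : Int) (xs : List String)
    (hb : ∀ y ∈ xs, 0 ≤ key y ∧ key y ≤ n) :
    PySem.List.sorted xs key false = pvBuckets key n xs := by
  rw [PySem.List.sorted_eq_foldl_insertBy]
  have h0 : pvBuckets key n [] = [] := by simp [pvBuckets]
  have := pv_foldl_insertBy_buckets key n xs [] hb
  rw [h0] at this
  simpa using this

-- values stored by the enumerate-fold dict construction are bounded
theorem pv_dict_values_bound (lo hi : Int) :
    ∀ (l : List (Int × String)) (d0 : PySem.Dict String Int),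
    (∀ p ∈ l, lo ≤ p.1 ∧ p.1 < hi) →
    (∀ w i, d0.get? w = some i → lo ≤ i ∧ i < hi) →
    ∀ w i, (l.foldl (fun d p => d.insert p.2 p.1) d0).get? w = some i → lo ≤ i ∧ i < hi := by
  intro l
  induction l with
  | nil => intro d0 _ h0; simpa using h0
  | cons p l ih =>
    intro d0 hl h0
    simp only [List.foldl_cons]
    apply ih _ (fun q hq => hl q (by simp [hq]))
    intro w i hw
    by_cases hwp : w = p.2
    · subst hwp
      rw [PySem.Dict.get?_insert_self] at hw
      have : i = p.1 := by simpa using hw.symm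
      subst this; exact hl p (by simp)
    · rw [PySem.Dict.get?_insert_of_ne _ _ hwp] at hw
      exact h0 w i hw

-- the B fold maintains buckets[k] = (prefix processed so far).filter (key = k), overflow = the unmatched prefix
theorem pv_bfold (d : PySem.Dict String Int) (m : Nat)
    (hv : ∀ w i, d.get? w = some i → 0 ≤ i ∧ i < (m : Int)) :
    ∀ (xs p : List String),
    xs.foldl
      (fun (st : List (List String) × List String) w =>
        match d.get? (PySem.Str.lower w) with
        | none => (st.1, st.2 ++ [w])
        | some idx => (st.1.modify idx.toNat (fun b => b ++ [w]), st.2))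
      ((List.range m).map (fun (k : Nat) => p.filter (fun y => PySem.Dict.getD d (PySem.Str.lower y) (m : Int) == (k : Int))),
       p.filter (fun y => (d.get? (PySem.Str.lower y)).isNone))
    = ((List.range m).map (fun (k : Nat) => (p ++ xs).filter (fun y => PySem.Dict.getD d (PySem.Str.lower y) (m : Int) == (k : Int))),
       (p ++ xs).filter (fun y => (d.get? (PySem.Str.lower y)).isNone)) := by
  intro xs
  induction xs with
  | nil => intro p; simp
  | cons x xs ih =>
    intro p
    simp only [List.foldl_cons]
    cases h : d.get? (PySem.Str.lower x) with
    | none =>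
      have hkey : PySem.Dict.getD d (PySem.Str.lower x) (m : Int) = (m : Int) := by
        simp [PySem.Dict.getD, h]
      have hbuk : ((List.range m).map (fun (k : Nat) => p.filter (fun y => PySem.Dict.getD d (PySem.Str.lower y) (m : Int) == (k : Int))))
          = ((List.range m).map (fun (k : Nat) => (p ++ [x]).filter (fun y => PySem.Dict.getD d (PySem.Str.lower y) (m : Int) == (k : Int)))) := by
        apply List.map_congr_left; intro k hk
        have hkm : k < m := List.mem_range.mp hk
        rw [List.filter_append]
        have : (PySem.Dict.getD d (PySem.Str.lower x) (m : Int) == (k : Int)) = false := by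
          rw [hkey]; simp; omega
        simp [this]
      have hov : (p.filter (fun y => (d.get? (PySem.Str.lower y)).isNone)) ++ [x]
          = (p ++ [x]).filter (fun y => (d.get? (PySem.Str.lower y)).isNone) := by
        rw [List.filter_append]; simp [h]
      simp only []
      rw [show ((List.range m).map (fun (k : Nat) => p.filter (fun y => PySem.Dict.getD d (PySem.Str.lower y) (m : Int) == (k : Int))),
            p.filter (fun y => (d.get? (PySem.Str.lower y)).isNone) ++ [x])
          = ((List.range m).map (fun (k : Nat) => (p ++ [x]).filter (fun y => PySem.Dict.getD d (PySem.Str.lower y) (m : Int) == (k : Int))),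
            (p ++ [x]).filter (fun y => (d.get? (PySem.Str.lower y)).isNone))
          from by rw [← hbuk, ← hov]]
      rw [ih (p ++ [x])]
      simp
    | some idx =>
      have hidx := hv _ _ h
      have hkey : PySem.Dict.getD d (PySem.Str.lower x) (m : Int) = idx := by
        simp [PySem.Dict.getD, h]
      have hov : p.filter (fun y => (d.get? (PySem.Str.lower y)).isNone)
          = (p ++ [x]).filter (fun y => (d.get? (PySem.Str.lower y)).isNone) := by
        rw [List.filter_append]; simp [h]
      have hbuk : ((List.range m).map (fun (k : Nat) => p.filter (fun y => PySem.Dict.getD d (PySem.Str.lower y) (m : Int) == (k : Int)))).modify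
            idx.toNat (fun b => b ++ [x])
          = (List.range m).map (fun (k : Nat) => (p ++ [x]).filter (fun y => PySem.Dict.getD d (PySem.Str.lower y) (m : Int) == (k : Int))) := by
        apply List.ext_getElem
        · simp
        · intro j hj hj'
          rw [List.getElem_modify]
          simp only [List.getElem_map, List.getElem_range] at *
          rw [List.filter_append]
          by_cases hje : idx.toNat = j
          · subst hje
            rw [if_pos rfl, Int.toNat_of_nonneg hidx.1]
            have ht : (PySem.Dict.getD d (PySem.Str.lower x) (m : Int) == idx) = true := by
              rw [hkey]; simp
            simp [ht]
          · rw [if_neg hje]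
            have hf : (PySem.Dict.getD d (PySem.Str.lower x) (m : Int) == (j : Int)) = false := by
              rw [hkey]; simp; omega
            simp [hf]
      have hih := ih (p ++ [x])
      rw [← hbuk, ← hov] at hih
      simp only [List.append_assoc, List.singleton_append] at hih
      exact hih

-- ===== VERDICT (by name: the statement is the Claim_ definition above) =====
theorem sort_auxiliary_spec : Claim_equal_sort_auxiliary := by
  intro text_a text_b _
  unfold Spec_sort_auxiliary sort_auxiliary sort_auxiliary_alt
  simp only []
  set tokens := (PySem.Str.split₀ text_a).map (fun w => PySem.Str.lower w) with htokens
  set d := (PySem.List.enumerate tokens 0).foldl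
      (fun d p => d.insert p.2 p.1) (PySem.Dict.empty (κ := String) (ν := Int)) with hd
  set m := tokens.length with hm
  have hv : ∀ w i, d.get? w = some i → 0 ≤ i ∧ i < (m : Int) := by
    rw [hd]
    apply pv_dict_values_bound 0 (m : Int) (PySem.List.enumerate tokens 0)
    · intro p hp
      rcases (PySem.List.mem_enumerate_iff _ _ _).mp hp with ⟨k, hk, hpk⟩
      rw [hpk]; simp; omega
    · intro w i hw
      simp [PySem.Dict.get?, PySem.Dict.empty] at hw
  have hkey : ∀ y, 0 ≤ PySem.Dict.getD d (PySem.Str.lower y) (m : Int)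
      ∧ PySem.Dict.getD d (PySem.Str.lower y) (m : Int) ≤ (m : Int) := by
    intro y
    cases h : d.get? (PySem.Str.lower y) with
    | none => simp [PySem.Dict.getD, h]
    | some i => have := hv _ _ h; simp [PySem.Dict.getD, h]; omega
  -- A side: stable sort = bucketed form with keys 0..m
  rw [pv_sorted_eq_buckets (fun w => PySem.Dict.getD d (PySem.Str.lower w) (m : Int)) (m : Int)
      text_b (fun y _ => hkey y)]
  -- B side: the fold from the all-empty state is the fold from the p = [] invariant state
  have hinit : ((List.range m).map (fun (k : Nat) => ([] : List String).filter (fun y => PySem.Dict.getD d (PySem.Str.lower y) (m : Int) == (k : Int))),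
       ([] : List String).filter (fun y => (d.get? (PySem.Str.lower y)).isNone))
      = (List.replicate m ([] : List String), ([] : List String)) := by
    simp
  have hB := pv_bfold d m hv text_b []
  rw [hinit] at hB
  rw [hB]
  simp only [List.nil_append]
  -- flatten the buckets and split off the overflow segment of the bucketed form
  rw [PySem.List.foldl_append_eq_flatten, List.nil_append, ← List.flatMap_def]
  unfold pvBuckets
  rw [PySem.List.pyRange_one_append 0 (m : Int) ((m : Int) + 1) (by omega) (by omega),
      PySem.List.pyRange_one_cons (by omega : (m : Int) < (m : Int) + 1)]
  rw [show PySem.List.pyRange ((m : Int) + 1) ((m : Int) + 1) = [] from by simp [PySem.List.pyRange]]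
  simp only [List.flatMap_append, List.flatMap_cons, List.flatMap_nil, List.append_nil]
  rw [PySem.List.pyRange_zero_natCast m, List.flatMap_map]
  congr 1
  apply List.filter_congr
  intro y _
  cases h : d.get? (PySem.Str.lower y) with
  | none => simp [PySem.Dict.getD, h]
  | some i =>
    have := hv _ _ h
    simp [PySem.Dict.getD, h]
    omega
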